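-- pv_equiv track=rewrite | github.com/previtus/RaVAEn-unibap-dorbit | tile_classifier/vis_functions.py | tile_location
-- ===== SOURCE A (Python) =====
-- def tile_location(tile_id, tile_size=32, grid_shape=[15,15]):
--     offset_into_center = int(tile_size / 2)
--
--     h_tiles_n = grid_shape[0]
--     w_tiles_n = grid_shape[1]
--     index = 0
--     for h_idx in range(h_tiles_n):
--         for w_idx in range(w_tiles_n):
--             if index == tile_id:
--                 return w_idx * tile_size + offset_into_center, h_idx * tile_size + offset_into_center
--             index += 1
-- ===== SOURCE B (Python) =====
-- def tile_location(tile_id, tile_size=32, grid_shape=[15,15]):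
--     h = grid_shape[0]
--     w = grid_shape[1]
--     if h > 0 and w > 0 and 0 <= tile_id < h * w:
--         off = int(tile_size / 2)
--         return (tile_id % w) * tile_size + off, (tile_id // w) * tile_size + off
--     return None
-- ===== Notes on version B (the rewrite author's own statement) =====
-- stated objective: alternative
-- what changed: B replaces A's nested scan over all grid cells searching for index == tile_id with a direct bounds check plus divmod (tile_id % w, tile_id // w), a closed form instead of a loop.
-- outside the precondition, e.g. on tile_location(0, 32, [5]): A raises IndexError, B raises IndexError
import Mathlib
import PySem

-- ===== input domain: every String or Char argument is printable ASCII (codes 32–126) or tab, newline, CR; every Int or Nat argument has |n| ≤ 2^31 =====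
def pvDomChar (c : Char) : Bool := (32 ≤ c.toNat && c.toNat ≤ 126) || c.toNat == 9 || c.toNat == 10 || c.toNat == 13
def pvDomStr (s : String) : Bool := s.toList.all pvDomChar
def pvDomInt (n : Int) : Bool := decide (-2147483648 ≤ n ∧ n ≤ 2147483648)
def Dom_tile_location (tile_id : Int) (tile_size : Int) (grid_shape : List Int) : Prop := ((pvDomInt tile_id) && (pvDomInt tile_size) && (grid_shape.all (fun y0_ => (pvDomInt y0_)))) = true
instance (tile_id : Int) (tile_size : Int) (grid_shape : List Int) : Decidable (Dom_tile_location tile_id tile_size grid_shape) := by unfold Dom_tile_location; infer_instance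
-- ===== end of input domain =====

-- B replaces A's nested scan for tile_id with a direct range check plus divmod; proved equal on all grids with at least two dimension entries.


-- ===== PORT A =====
-- inner 'for w_idx in range(w_tiles_n)': returns .inl result on the early return,
-- .inr updated index when the row is exhausted
def tlInner (tile_id tile_size off h_idx : Int) (w_idx index : Int) : Nat → (Option (List Int)) ⊕ Int
  | 0 => .inr index
  | n + 1 =>
    if index == tile_id then
      .inl (some [w_idx * tile_size + off, h_idx * tile_size + off])
    else
      tlInner tile_id tile_size off h_idx (w_idx + 1) (index + 1) n

-- outer 'for h_idx in range(h_tiles_n)'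
def tlOuter (tile_id tile_size off w_tiles_n : Int) (h_idx index : Int) : Nat → Option (List Int)
  | 0 => none
  | n + 1 =>
    match tlInner tile_id tile_size off h_idx 0 index w_tiles_n.toNat with
    | .inl r => r
    | .inr index' => tlOuter tile_id tile_size off w_tiles_n (h_idx + 1) index' n

-- int(tile_size / 2): exact true division of an int ≤ 2^31 by 2 is exact in float,
-- and int() truncates toward zero = Int.tdiv
def tile_location (tile_id : Int) (tile_size : Int) (grid_shape : List Int) : Option (List Int) :=
  let off := Int.tdiv tile_size 2
  match PySem.List.pyGet? grid_shape 0, PySem.List.pyGet? grid_shape 1 with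
  | some h, some w => tlOuter tile_id tile_size off w 0 0 h.toNat
  | _, _ => none   -- unreachable under Pre_tile_location (grid_shape[0]/[1] would raise IndexError)

-- ===== PORT B =====
def tile_location_alt (tile_id : Int) (tile_size : Int) (grid_shape : List Int) : Option (List Int) :=
  (PySem.List.pyGet? grid_shape 0).bind fun h =>
    (PySem.List.pyGet? grid_shape 1).bind fun w =>
      if 0 < h ∧ 0 < w ∧ 0 ≤ tile_id ∧ tile_id < h * w then
        let off := Int.tdiv tile_size 2
        some [(PySem.Int.mod tile_id w) * tile_size + off,
              (PySem.Int.floordiv tile_id w) * tile_size + off]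
      else none

-- ===== PRECONDITION & SPEC =====
-- A raises IndexError on grid_shape[0] / grid_shape[1] when fewer than two entries exist
def Pre_tile_location (tile_id : Int) (tile_size : Int) (grid_shape : List Int) : Prop :=
  2 ≤ grid_shape.length
instance (tile_id : Int) (tile_size : Int) (grid_shape : List Int) : Decidable (Pre_tile_location tile_id tile_size grid_shape) := by unfold Pre_tile_location; infer_instance
def pvWitness_tile_location : Int × Int × List Int := (7, 32, [3, 4])

def Spec_tile_location (tile_id : Int) (tile_size : Int) (grid_shape : List Int) (out : Option (List Int)) : Prop := out = tile_location_alt tile_id tile_size grid_shape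
instance (tile_id : Int) (tile_size : Int) (grid_shape : List Int) (out : Option (List Int)) : Decidable (Spec_tile_location tile_id tile_size grid_shape out) := by unfold Spec_tile_location; infer_instance

-- ===== CLAIM (what is proved, stated in full; the proofs are below) =====
def Claim_equal_tile_location : Prop := ∀ (tile_id : Int) (tile_size : Int) (grid_shape : List Int), Dom_tile_location tile_id tile_size grid_shape → Pre_tile_location tile_id tile_size grid_shape → Spec_tile_location tile_id tile_size grid_shape (tile_location tile_id tile_size grid_shape)

-- ===== LEMMAS AND PROOFS =====

-- inner row scan: finds tile_id iff it lies within this row's index window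
theorem tlInner_eq (tid ts off h_idx : Int) :
    ∀ (n : Nat) (w_idx index : Int),
      tlInner tid ts off h_idx w_idx index n =
        if index ≤ tid ∧ tid < index + n then
          .inl (some [(w_idx + (tid - index)) * ts + off, h_idx * ts + off])
        else .inr (index + n) := by
  intro n
  induction n with
  | zero =>
    intro w_idx index
    simp only [tlInner]
    split_ifs with h
    · omega
    · simp
  | succ n ih =>
    intro w_idx index
    simp only [tlInner, beq_iff_eq]
    split_ifs with h1 h2 h2
    · subst h1; simp
    · exfalso; push_cast at h2; omega
    · rw [ih, if_pos (by push_cast at h2 ⊢; omega)]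
      have : w_idx + 1 + (tid - (index + 1)) = w_idx + (tid - index) := by ring
      rw [this]
    · rw [ih, if_neg (by push_cast at h2 ⊢; omega)]
      congr 1; push_cast; ring

-- outer scan, positive width: closed form via emod/ediv
theorem tlOuter_eq (tid ts off w : Int) (hw : 0 < w) :
    ∀ (n : Nat) (h_idx index : Int),
      tlOuter tid ts off w h_idx index n =
        if index ≤ tid ∧ tid < index + n * w then
          some [((tid - index) % w) * ts + off, (h_idx + (tid - index) / w) * ts + off]
        else none := by
  intro n
  induction n with
  | zero =>
    intro h_idx index
    simp only [tlOuter]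
    split_ifs with h
    · exfalso; push_cast at h; omega
    · rfl
  | succ n ih =>
    intro h_idx index
    have hwn : (w.toNat : Int) = w := by omega
    have hnw : (0:Int) ≤ (n : Int) * w := by positivity
    have hr : ((n:Int) + 1) * w = w + (n:Int) * w := by ring
    simp only [tlOuter, tlInner_eq, hwn]
    split_ifs with h1 h2 h2
    · -- found in this row, and the overall window indeed contains tid
      have e1 : (tid - index) % w = tid - index := Int.emod_eq_of_lt (by omega) (by omega)
      have e2 : (tid - index) / w = 0 := Int.ediv_eq_zero_of_lt (by omega) (by omega)
      show some _ = _
      rw [e1, e2]; norm_num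
    · -- found in this row but overall window empty: impossible
      exfalso; push_cast at h2
      exact h2 (by constructor <;> linarith [h1.1, h1.2])
    · -- this row exhausted, tid further down: recurse with shifted index
      show tlOuter tid ts off w (h_idx + 1) (index + w) n = _
      rw [ih, if_pos (by push_cast at h2; constructor <;> [omega; linarith [h2.2]])]
      have e1 : (tid - (index + w)) % w = (tid - index) % w := by
        have hx : tid - (index + w) = (tid - index) + (-1) * w := by ring
        rw [hx, Int.add_mul_emod_self_right]
      have e2 : h_idx + 1 + (tid - (index + w)) / w = h_idx + (tid - index) / w := by
        have hx : tid - (index + w) = (tid - index) + (-1) * w := by ring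
        rw [hx, Int.add_mul_ediv_right _ _ (by omega : w ≠ 0)]
        ring
      rw [e1, e2]
    · -- this row exhausted and the overall window does not contain tid
      show tlOuter tid ts off w (h_idx + 1) (index + w) n = _
      rw [ih, if_neg (by push_cast at h2 ⊢; intro hc; exact h2 ⟨by omega, by linarith [hc.2]⟩)]

-- non-positive width: the inner loop body never runs, nothing is ever found
theorem tlOuter_nonpos (tid ts off w : Int) (hw : w ≤ 0) :
    ∀ (n : Nat) (h_idx index : Int),
      tlOuter tid ts off w h_idx index n = none := by
  intro n
  induction n with
  | zero => intro _ _; rfl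
  | succ n ih =>
    intro h_idx index
    have : w.toNat = 0 := by omega
    simp only [tlOuter, this, tlInner]
    exact ih _ _

-- ===== VERDICT (by name: the statement is the Claim_ definition above) =====
theorem tile_location_spec : Claim_equal_tile_location := by
  intro tid ts gs _ hpre
  unfold Spec_tile_location tile_location tile_location_alt
  match gs, hpre with
  | a :: b :: rest, _ =>
    have e0 : PySem.List.pyGet? (a :: b :: rest) 0 = some a := by
      have hn : (0:Int) ≤ (rest.length : Int) + 1 := by positivity
      simp [PySem.List.pyGet?, PySem.List.pyIdx?, hn]
    have e1 : PySem.List.pyGet? (a :: b :: rest) 1 = some b := by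
      simp [PySem.List.pyGet?, PySem.List.pyIdx?]
    rw [e0, e1]
    simp only [Option.bind_some]
    by_cases hb : 0 < b
    · rw [tlOuter_eq tid ts _ b hb]
      by_cases ha : 0 < a
      · have han : (a.toNat : Int) = a := by omega
        rw [han]
        by_cases hin : 0 ≤ tid ∧ tid < a * b
        · rw [if_pos (by omega), if_pos (by exact ⟨ha, hb, hin.1, hin.2⟩)]
          rw [PySem.Int.mod_eq_emod_of_pos hb, PySem.Int.floordiv_eq_ediv_of_pos hb]
          norm_num
        · rw [if_neg (by omega), if_neg (by tauto)]
      · rw [show ((a.toNat : Int)) = 0 by omega]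
        rw [if_neg (by omega), if_neg (by tauto)]
    · rw [tlOuter_nonpos tid ts _ b (by omega), if_neg (by tauto)]
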